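-- pv_equiv track=rewrite | github.com/kazuhiko1979/edabit | recursion/制御フロー_for_03.py | simpleSummationOfSummation
-- ===== SOURCE A (Python) =====
-- def simpleSummationOfSummation(n):
--
--     total = 0
--
--     for i in range(1, n+1):
--     # i = 1; i <=n; i++
--     # 内側のfor文では、他の変数であるjを使います
--     # jがiになった時に、ループ処理を修了します
--
--         # iの総和の計算
--         summationOfI = 0
--
--         for j in range(1, i+1):
--             summationOfI += j
--
--         total += summationOfI
--
--     return total
-- ===== SOURCE B (Python) =====
-- def simpleSummationOfSummation(n):
--     return n * (n + 1) * (n + 2) // 6 if n > 0 else 0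
-- ===== Notes on version B (the rewrite author's own statement) =====
-- stated objective: faster
-- what changed: Replaced the nested quadratic summation loops with the closed form n·(n+1)·(n+2) over six for the sum of the first n triangular numbers.
import Mathlib
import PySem

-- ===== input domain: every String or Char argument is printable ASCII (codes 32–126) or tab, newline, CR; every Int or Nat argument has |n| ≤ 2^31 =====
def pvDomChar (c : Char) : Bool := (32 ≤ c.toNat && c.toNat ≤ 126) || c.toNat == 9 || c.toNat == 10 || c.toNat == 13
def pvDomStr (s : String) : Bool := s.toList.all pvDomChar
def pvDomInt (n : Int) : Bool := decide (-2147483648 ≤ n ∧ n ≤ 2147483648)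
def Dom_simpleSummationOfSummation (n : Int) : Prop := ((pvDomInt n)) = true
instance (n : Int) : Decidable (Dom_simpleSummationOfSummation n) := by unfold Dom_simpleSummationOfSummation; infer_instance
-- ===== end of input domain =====

-- B replaces A's nested O(n^2) summation loops with the closed form n(n+1)(n+2)//6 (faster, asymptotic).

-- ===== PORT A =====
def simpleSummationOfSummation (n : Int) : Int :=
  (PySem.List.pyRange 1 (n + 1) 1).foldl
    (fun total i =>
      total + (PySem.List.pyRange 1 (i + 1) 1).foldl (fun summationOfI j => summationOfI + j) 0)
    0

-- ===== PORT B =====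
def simpleSummationOfSummation_alt (n : Int) : Int :=
  if n > 0 then PySem.Int.floordiv (n * (n + 1) * (n + 2)) 6 else 0

-- ===== PRECONDITION & SPEC =====
def Spec_simpleSummationOfSummation (n : Int) (out : Int) : Prop := out = simpleSummationOfSummation_alt n
instance (n : Int) (out : Int) : Decidable (Spec_simpleSummationOfSummation n out) := by unfold Spec_simpleSummationOfSummation; infer_instance

-- ===== CLAIM (what is proved, stated in full; the proofs are below) =====
def Claim_equal_simpleSummationOfSummation : Prop := ∀ (n : Int), Dom_simpleSummationOfSummation n → Spec_simpleSummationOfSummation n (simpleSummationOfSummation n)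

-- ===== LEMMAS AND PROOFS =====

-- the inner loop sums 1..b
theorem pv_inner_sum : ∀ (b : Int), 0 ≤ b →
    ((PySem.List.pyRange 1 (b + 1) 1).foldl (fun s j => s + j) 0) * 2 = b * (b + 1) := by
  intro b hb
  induction b, hb using Int.le_induction with
  | base => simp
  | succ b hb ih =>
      rw [PySem.List.pyRange_one_succ_right (by omega), List.foldl_append]
      simp only [List.foldl_cons, List.foldl_nil]
      nlinarith [ih]

-- the outer loop, times 6
theorem pv_outer_sum : ∀ (b : Int), 0 ≤ b →
    (simpleSummationOfSummation b) * 6 = b * (b + 1) * (b + 2) := by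
  intro b hb
  unfold simpleSummationOfSummation
  induction b, hb using Int.le_induction with
  | base => simp
  | succ b hb ih =>
      rw [PySem.List.pyRange_one_succ_right (by omega), List.foldl_append]
      simp only [List.foldl_cons, List.foldl_nil]
      have h := pv_inner_sum (b + 1) (by omega)
      nlinarith [ih]

-- ===== VERDICT (by name: the statement is the Claim_ definition above) =====
theorem simpleSummationOfSummation_spec : Claim_equal_simpleSummationOfSummation := by
  intro n _
  unfold Spec_simpleSummationOfSummation simpleSummationOfSummation_alt
  by_cases h : n > 0
  · have h6 := pv_outer_sum n (by omega)
    rw [if_pos h, PySem.Int.floordiv_eq_ediv_of_pos (by norm_num), ← h6,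
      Int.mul_ediv_cancel _ (by norm_num)]
  · rw [if_neg h]
    unfold simpleSummationOfSummation
    have hz : n.toNat = 0 := by omega
    simp [PySem.List.pyRange_one, hz]
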